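-- pv_equiv track=rewrite | github.com/parshuramreddysudda/InterviewPreparation | LeetCode Problems/src/Hard/MinWastage.py | getMaximumPackageIndexWithBox
-- ===== SOURCE A (Python) =====
-- def getMaximumPackageIndexWithBox(box, packages):
--
--     if len(packages) == 0:
--         return 0
--     left, right = 0, len(packages) - 1
--     while left <= right:
--         mid = left + (right - left) // 2
--         if packages[mid] == box:
--             return mid
--         elif packages[mid] < box:
--             left = mid + 1
--         else:
--             right = mid - 1
--
--     return right
-- ===== SOURCE B (Python) =====
-- def getMaximumPackageIndexWithBox(box, packages):
--     if not packages:
--         return 0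
--
--     def go(xs, off):
--         if not xs:
--             return off - 1
--         m = (len(xs) - 1) // 2
--         v = xs[m]
--         if v == box:
--             return off + m
--         if v < box:
--             return go(xs[m + 1:], off + m + 1)
--         return go(xs[:m], off)
--
--     return go(packages, 0)
-- ===== Notes on version B (the rewrite author's own statement) =====
-- stated objective: alternative
-- what changed: A's iterative binary search over an index pair (left, right) is replaced by a recursion on list slices: the helper carries the current sublist and its absolute offset, takes xs[m] with m=(len(xs)-1)//2, and recurses on xs[m+1:] or xs[:m], with no right pointer and the empty-slice base case returning off-1.
import Mathlib
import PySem

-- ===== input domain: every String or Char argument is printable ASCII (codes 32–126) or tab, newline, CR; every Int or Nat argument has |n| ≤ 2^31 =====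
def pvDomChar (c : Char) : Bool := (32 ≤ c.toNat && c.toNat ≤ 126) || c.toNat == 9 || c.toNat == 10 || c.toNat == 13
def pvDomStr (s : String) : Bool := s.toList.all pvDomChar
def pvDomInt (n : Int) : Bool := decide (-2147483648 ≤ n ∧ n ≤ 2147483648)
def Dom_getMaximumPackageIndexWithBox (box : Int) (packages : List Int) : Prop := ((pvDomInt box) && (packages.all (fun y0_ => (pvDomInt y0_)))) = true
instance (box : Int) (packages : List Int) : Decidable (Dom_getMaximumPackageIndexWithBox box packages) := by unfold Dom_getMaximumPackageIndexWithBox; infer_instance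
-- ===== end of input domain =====

-- B replaces A's index-pair (left, right) binary-search loop by a recursion on list SLICES:
-- the helper carries the current sublist and its offset, with no right pointer at all
-- (objective: alternative; same value on every input).

-- ===== PORT A =====
-- A's while-loop as a tail recursion over the loop state (left, right).  The Nat argument is a
-- totality guard only: it starts at packages.length, the interval right-left+1 shrinks by at
-- least 1 per iteration, so the fuel never runs out while left ≤ right.  The `none` branch of
-- pyGet? is likewise unreachable (0 ≤ left ≤ mid ≤ right < len throughout).
def pvLoopA (box : Int) (packages : List Int) : Nat → Int → Int → Int
  | 0, _, right => right
  | fuel + 1, left, right =>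
    if left ≤ right then
      match PySem.List.pyGet? packages (left + PySem.Int.floordiv (right - left) 2) with
      | some v =>
        if v = box then left + PySem.Int.floordiv (right - left) 2
        else if v < box then
          pvLoopA box packages fuel (left + PySem.Int.floordiv (right - left) 2 + 1) right
        else
          pvLoopA box packages fuel left (left + PySem.Int.floordiv (right - left) 2 - 1)
      | none => right
    else right

def getMaximumPackageIndexWithBox (box : Int) (packages : List Int) : Int :=
  if (packages.length : Int) = 0 then 0
  else pvLoopA box packages packages.length 0 ((packages.length : Int) - 1)

-- ===== PORT B =====
-- B's helper go(xs, off): recursion on the sublist itself — empty slice returns off-1,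
-- m = (len(xs)-1)//2, xs[m]==box returns off+m, else recurse on the slice xs[m+1:] or xs[:m].
-- The `none` branch of pyGet? is unreachable (m < xs.length when xs ≠ []).
def pvGoB (box : Int) (xs : List Int) (off : Int) : Int :=
  if h : xs = [] then off - 1
  else
    let m : Nat := (xs.length - 1) / 2
    match PySem.List.pyGet? xs (m : Int) with
    | some v =>
      if v = box then off + (m : Int)
      else if v < box then
        pvGoB box (PySem.List.slice xs (some ((m : Int) + 1)) none) (off + (m : Int) + 1)
      else
        pvGoB box (PySem.List.slice xs none (some (m : Int))) off
    | none => off - 1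
termination_by xs.length
decreasing_by
  · have hlen : 1 ≤ xs.length := List.length_pos_iff.mpr h
    have : ((m : Int) + 1) = (((m + 1 : Nat) : Int)) := by push_cast; ring
    rw [this, PySem.List.slice_from_natCast]
    simp only [List.length_drop]
    omega
  · have hlen : 1 ≤ xs.length := List.length_pos_iff.mpr h
    have hm : m ≤ xs.length - 1 := Nat.div_le_self _ _
    rw [PySem.List.slice_to_natCast]
    simp only [List.length_take]
    omega

def getMaximumPackageIndexWithBox_alt (box : Int) (packages : List Int) : Int :=
  if packages = [] then 0
  else pvGoB box packages 0

-- ===== PRECONDITION & SPEC =====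
def Spec_getMaximumPackageIndexWithBox (box : Int) (packages : List Int) (out : Int) : Prop := out = getMaximumPackageIndexWithBox_alt box packages
instance (box : Int) (packages : List Int) (out : Int) : Decidable (Spec_getMaximumPackageIndexWithBox box packages out) := by unfold Spec_getMaximumPackageIndexWithBox; infer_instance

-- ===== CLAIM (what is proved, stated in full; the proofs are below) =====
def Claim_equal_getMaximumPackageIndexWithBox : Prop := ∀ (box : Int) (packages : List Int), Dom_getMaximumPackageIndexWithBox box packages → Spec_getMaximumPackageIndexWithBox box packages (getMaximumPackageIndexWithBox box packages)

-- ===== LEMMAS AND PROOFS =====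

-- Python (s-1)//2 on a Nat-valued interval length agrees with Nat division.
lemma pvFloordiv_nat (k : Nat) :
    PySem.Int.floordiv (k : Int) 2 = ((k / 2 : Nat) : Int) := by
  rw [PySem.Int.floordiv_eq_ediv_of_pos (by norm_num)]
  omega

-- Core invariant: B's recursion on the window (ps.drop l).take s at offset l computes exactly
-- A's loop on the interval [l, l+s-1], for any sufficient fuel.
lemma pvGo_eq_loop (box : Int) (ps : List Int) :
    ∀ fuel s l, s ≤ fuel → l + s ≤ ps.length →
      pvGoB box ((ps.drop l).take s) (l : Int) =
        pvLoopA box ps fuel (l : Int) ((l : Int) + (s : Int) - 1) := by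
  intro fuel
  induction fuel with
  | zero =>
    intro s l hs _
    interval_cases s
    rw [pvGoB]
    simp [pvLoopA]
  | succ n ih =>
    intro s l hs hlen
    match s with
    | 0 =>
      rw [pvGoB]
      simp only [List.take_zero, pvLoopA]
      rw [if_neg (by omega)]
      push_cast; ring
    | k + 1 =>
      set xs := (ps.drop l).take (k + 1) with hxs
      have hxslen : xs.length = k + 1 := by
        simp [hxs, List.length_take, List.length_drop]; omega
      have hne : xs ≠ [] := by
        intro hempty; rw [hempty] at hxslen; simp at hxslen
      have hm : (xs.length - 1) / 2 = k / 2 := by rw [hxslen]; simp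
      have hmk : k / 2 ≤ k := Nat.div_le_self _ _
      -- the element both sides inspect
      have hidx : l + k / 2 < ps.length := by omega
      have hgetA : PySem.List.pyGet? ps ((l : Int) + PySem.Int.floordiv (((l : Int) + (k + 1 : Nat) - 1) - l) 2)
          = ps[l + k / 2]? := by
        have : ((l : Int) + ((k + 1 : Nat) : Int) - 1) - (l : Int) = ((k : Nat) : Int) := by
          push_cast; ring
        rw [this, pvFloordiv_nat]
        have : (l : Int) + ((k / 2 : Nat) : Int) = (((l + k / 2 : Nat)) : Int) := by push_cast; ring
        rw [this, PySem.List.pyGet?_natCast]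
      have hgetB : PySem.List.pyGet? xs (((k / 2 : Nat)) : Int) = ps[l + k / 2]? := by
        rw [PySem.List.pyGet?_natCast, hxs]
        rw [List.getElem?_take_of_lt (by omega), List.getElem?_drop]
      obtain ⟨v, hv⟩ : ∃ v, ps[l + k / 2]? = some v :=
        ⟨ps[l + k / 2], List.getElem?_eq_getElem hidx⟩
      -- unfold one step of each side
      rw [pvGoB]
      rw [dif_neg hne]
      simp only [hm]
      rw [hgetB, hv]
      conv_rhs => rw [pvLoopA]
      rw [if_pos (by push_cast; omega)]
      rw [hgetA, hv]
      simp only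
      by_cases hveq : v = box
      · rw [if_pos hveq, if_pos hveq]
        have : ((((l : Int) + ((k + 1 : Nat) : Int) - 1) - l)) = ((k : Nat) : Int) := by
          push_cast; ring
        rw [this, pvFloordiv_nat]
      · rw [if_neg hveq, if_neg hveq]
        have hmidA : (l : Int) + PySem.Int.floordiv (((l : Int) + ((k + 1 : Nat) : Int) - 1) - l) 2
            = (l : Int) + ((k / 2 : Nat) : Int) := by
          have : (((l : Int) + ((k + 1 : Nat) : Int) - 1) - l) = ((k : Nat) : Int) := by
            push_cast; ring
          rw [this, pvFloordiv_nat]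
        by_cases hvlt : v < box
        · rw [if_pos hvlt, if_pos hvlt, hmidA]
          -- right half: xs[m+1:] = window at l + m + 1 of size k - m
          have hslice : PySem.List.slice xs (some (((k / 2 : Nat) : Int) + 1)) none
              = (ps.drop (l + (k / 2 + 1))).take (k - k / 2) := by
            have : (((k / 2 : Nat) : Int) + 1) = (((k / 2 + 1 : Nat)) : Int) := by push_cast; ring
            rw [this, PySem.List.slice_from_natCast, hxs, List.drop_take, List.drop_drop]
            have e1 : k + 1 - (k / 2 + 1) = k - k / 2 := by omega
            rw [e1]
          rw [hslice]
          have := ih (k - k / 2) (l + (k / 2 + 1)) (by omega) (by omega)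
          have hcast1 : (((l + (k / 2 + 1) : Nat)) : Int) = (l : Int) + ((k / 2 : Nat) : Int) + 1 := by
            push_cast; ring
          rw [hcast1] at this
          have hcast2 : (l : Int) + ((k / 2 : Nat) : Int) + 1 + (((k - k / 2 : Nat)) : Int) - 1
              = (l : Int) + ((k + 1 : Nat) : Int) - 1 := by
            push_cast; omega
          rw [hcast2] at this
          exact this
        · rw [if_neg hvlt, if_neg hvlt, hmidA]
          -- left half: xs[:m] = window at l of size k/2
          have hslice : PySem.List.slice xs none (some (((k / 2 : Nat)) : Int))
              = (ps.drop l).take (k / 2) := by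
            rw [PySem.List.slice_to_natCast, hxs, List.take_take]
            congr 1; omega
          rw [hslice]
          exact ih (k / 2) l (by omega) (by omega)

-- ===== VERDICT (by name: the statement is the Claim_ definition above) =====
theorem getMaximumPackageIndexWithBox_spec : Claim_equal_getMaximumPackageIndexWithBox := by
  intro box packages _
  unfold Spec_getMaximumPackageIndexWithBox getMaximumPackageIndexWithBox getMaximumPackageIndexWithBox_alt
  by_cases hps : packages = []
  · simp [hps]
  · rw [if_neg (by simpa using hps), if_neg hps]
    have := pvGo_eq_loop box packages packages.length packages.length 0 le_rfl (by omega)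
    simpa using this.symm
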